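-- pv_equiv track=rewrite | github.com/x-dune/advent_of_code | 2020/day24/day24.py | get_initial_black_tiles
-- ===== SOURCE A (Python) =====
-- from collections import Counter, defaultdict, deque
--
-- def step(coord, dir):
--     x, y, z = coord
--     if dir == "e":
--         return (x + 1, y - 1, z)
--     if dir == "ne":
--         return (x + 1, y, z - 1)
--     if dir == "se":
--         return (x, y - 1, z + 1)
--     if dir == "w":
--         return (x - 1, y + 1, z)
--     if dir == "nw":
--         return (x, y + 1, z - 1)
--     if dir == "sw":
--         return (x - 1, y, z + 1)
--
-- def get_initial_black_tiles(lines):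
--     coords = []
--     current = 0, 0, 0
--     for line in lines:
--         for dir in line:
--             current = step(current, dir)
--         coords.append(current)
--         current = 0, 0, 0
--
--     return {coord: count for coord, count in Counter(coords).items() if count % 2 == 1}
-- ===== SOURCE B (Python) =====
-- from collections import Counter
--
--
-- DELTAS = {
--     "e": (1, -1, 0),
--     "ne": (1, 0, -1),
--     "se": (0, -1, 1),
--     "w": (-1, 1, 0),
--     "nw": (0, 1, -1),
--     "sw": (-1, 0, 1),
-- }
--
--
-- def line_coord(line):
--     # an unrecognised direction has no delta: the line has no coordinate (None),
--     # like A's step propagates None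
--     if any(d not in DELTAS for d in line):
--         return None
--     cnt = Counter(line)
--     x = y = z = 0
--     for d, (dx, dy, dz) in DELTAS.items():
--         n = cnt[d]
--         x += n * dx
--         y += n * dy
--         z += n * dz
--     return (x, y, z)
--
--
-- def get_initial_black_tiles(lines):
--     coords = [line_coord(line) for line in lines]
--     return {coord: count for coord, count in Counter(coords).items() if count % 2 == 1}
-- ===== Notes on version B (the rewrite author's own statement) =====
-- stated objective: alternative
-- what changed: Each line's tile coordinate is computed in closed form from a Counter of its direction tokens (count-times-delta per direction), None for a line with an unknown token, instead of threading a coordinate token by token through a step function; the odd-count filter over coordinates is unchanged. Pre_ excludes lines with an unknown token before the last token (A raises TypeError) and inputs with an odd number of unknown-token lines (A returns a dict keyed by None, not a value of the declared type).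
-- outside the precondition, e.g. on get_initial_black_tiles([['x']]): A returns {None: 1}, B returns {None: 1}
import Mathlib
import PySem

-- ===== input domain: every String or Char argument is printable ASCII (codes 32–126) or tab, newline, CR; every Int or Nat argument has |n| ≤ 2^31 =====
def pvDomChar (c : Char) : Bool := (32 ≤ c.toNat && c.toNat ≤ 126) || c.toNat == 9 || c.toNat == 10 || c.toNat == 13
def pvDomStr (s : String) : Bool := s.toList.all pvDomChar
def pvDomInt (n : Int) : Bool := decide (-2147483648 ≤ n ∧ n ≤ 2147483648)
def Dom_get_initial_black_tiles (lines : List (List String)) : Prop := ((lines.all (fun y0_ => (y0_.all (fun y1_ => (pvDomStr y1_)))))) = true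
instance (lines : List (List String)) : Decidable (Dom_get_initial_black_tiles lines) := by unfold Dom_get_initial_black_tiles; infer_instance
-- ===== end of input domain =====

-- B computes each line's tile coordinate in closed form (token counts × per-direction deltas),
-- with None for a line containing an unknown direction, instead of stepping token by token;
-- the odd-count filter over coordinates is unchanged.


-- ===== PORT A =====
-- step(coord, dir): returns none for an unknown direction (Python's step returns None there;
-- the none is threaded through the rest of the line like Python's None, which raises on the
-- next step — those inputs are outside Pre_)
def pvStepA (c : Int × Int × Int) (dir : String) : Option (Int × Int × Int) :=
  let (x, y, z) := c
  if dir = "e" then some (x + 1, y - 1, z)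
  else if dir = "ne" then some (x + 1, y, z - 1)
  else if dir = "se" then some (x, y - 1, z + 1)
  else if dir = "w" then some (x - 1, y + 1, z)
  else if dir = "nw" then some (x, y + 1, z - 1)
  else if dir = "sw" then some (x - 1, y, z + 1)
  else none

def get_initial_black_tiles (lines : List (List String)) : List (Int × Int × Int × Int) :=
  let coords : List (Option (Int × Int × Int)) := lines.foldl (fun acc line =>
      acc ++ [line.foldl (fun cur d => cur.bind (fun c => pvStepA c d))
                (some ((0 : Int), (0 : Int), (0 : Int)))]) []
  -- {coord: count for coord, count in Counter(coords).items() if count % 2 == 1}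
  (((PySem.Dict.counter coords).items.foldl
      (fun d p => if PySem.Int.mod p.2 2 == 1 then d.insert p.1 p.2 else d)
      (PySem.Dict.empty : PySem.Dict (Option (Int × Int × Int)) Int)).items).map
    (fun p => match p.1 with
      | some (x, y, z) => (x, y, z, p.2)
      | none => (0, 0, 0, p.2))   -- a none key with odd count is not a value of the declared type; outside Pre_

-- ===== PORT B =====
def pvDeltas : List (String × (Int × Int × Int)) :=
  [("e", (1, -1, 0)), ("ne", (1, 0, -1)), ("se", (0, -1, 1)),
   ("w", (-1, 1, 0)), ("nw", (0, 1, -1)), ("sw", (-1, 0, 1))]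

def pvLineCoord (line : List String) : Option (Int × Int × Int) :=
  if line.any (fun d => !(pvDeltas.map Prod.fst).contains d) then none
  else
    let cnt := PySem.Dict.counter line
    some (pvDeltas.foldl (fun acc p =>
        let n := cnt.getD p.1 0
        (acc.1 + n * p.2.1, acc.2.1 + n * p.2.2.1, acc.2.2 + n * p.2.2.2))
      ((0 : Int), (0 : Int), (0 : Int)))

def get_initial_black_tiles_alt (lines : List (List String)) : List (Int × Int × Int × Int) :=
  let coords : List (Option (Int × Int × Int)) := lines.map pvLineCoord
  (((PySem.Dict.counter coords).items.foldl
      (fun d p => if PySem.Int.mod p.2 2 == 1 then d.insert p.1 p.2 else d)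
      (PySem.Dict.empty : PySem.Dict (Option (Int × Int × Int)) Int)).items).map
    (fun p => match p.1 with
      | some (x, y, z) => (x, y, z, p.2)
      | none => (0, 0, 0, p.2))

-- ===== PRECONDITION & SPEC =====
def pvValid (d : String) : Bool :=
  d == "e" || d == "ne" || d == "se" || d == "w" || d == "nw" || d == "sw"

-- Pre_ excludes (a) lines with an unknown direction token before the last token, where A
-- raises TypeError unpacking None, and (b) inputs with an odd number of lines containing an
-- unknown token, where A returns a dict keyed by None — not a value of the declared type.
def Pre_get_initial_black_tiles (lines : List (List String)) : Prop :=
  (∀ line ∈ lines, ∀ d ∈ line.dropLast, pvValid d = true) ∧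
  lines.countP (fun line => !line.all pvValid) % 2 = 0

instance (lines : List (List String)) : Decidable (Pre_get_initial_black_tiles lines) := by
  unfold Pre_get_initial_black_tiles; infer_instance

def pvWitness_get_initial_black_tiles : List (List String) :=
  [["e", "e", "w"], ["ne"], ["ne"], [], ["se", "sw"]]

def Spec_get_initial_black_tiles (lines : List (List String)) (out : List (Int × Int × Int × Int)) : Prop := out = get_initial_black_tiles_alt lines
instance (lines : List (List String)) (out : List (Int × Int × Int × Int)) : Decidable (Spec_get_initial_black_tiles lines out) := by unfold Spec_get_initial_black_tiles; infer_instance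

-- ===== CLAIM (what is proved, stated in full; the proofs are below) =====
def Claim_equal_get_initial_black_tiles : Prop := ∀ (lines : List (List String)), Dom_get_initial_black_tiles lines → Pre_get_initial_black_tiles lines → Spec_get_initial_black_tiles lines (get_initial_black_tiles lines)

-- ===== LEMMAS AND PROOFS =====

-- A's step loop, on a line of valid directions, adds the per-direction counts
-- times the deltas to the start coordinate.
lemma pvFoldStep (line : List String) (h : ∀ d ∈ line, pvValid d = true) (x y z : Int) :
    line.foldl (fun cur d => cur.bind (fun c => pvStepA c d)) (some (x, y, z)) =
      some (x + line.count "e" + line.count "ne" - line.count "w" - line.count "sw",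
            y + line.count "w" + line.count "nw" - line.count "e" - line.count "se",
            z + line.count "se" + line.count "sw" - line.count "ne" - line.count "nw") := by
  induction line generalizing x y z with
  | nil => simp
  | cons d rest ih =>
    have hd := h d (List.mem_cons_self ..)
    have hrest : ∀ e ∈ rest, pvValid e = true := fun e he => h e (List.mem_cons_of_mem _ he)
    simp only [pvValid, Bool.or_eq_true, beq_iff_eq] at hd
    rcases hd with ((((h1 | h1) | h1) | h1) | h1) | h1 <;> subst h1 <;>
      rw [List.foldl_cons] <;>
      simp only [Option.bind_some] <;>
      (first
        | rw [show pvStepA (x, y, z) "e" = some (x + 1, y - 1, z) from rfl]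
        | rw [show pvStepA (x, y, z) "ne" = some (x + 1, y, z - 1) from rfl]
        | rw [show pvStepA (x, y, z) "se" = some (x, y - 1, z + 1) from rfl]
        | rw [show pvStepA (x, y, z) "w" = some (x - 1, y + 1, z) from rfl]
        | rw [show pvStepA (x, y, z) "nw" = some (x, y + 1, z - 1) from rfl]
        | rw [show pvStepA (x, y, z) "sw" = some (x - 1, y, z + 1) from rfl]) <;>
      rw [ih hrest] <;>
      simp only [List.count_cons, Option.some.injEq, Prod.mk.injEq] <;>
      norm_num <;> omega

lemma pvStepA_invalid (c : Int × Int × Int) (d : String) (h : pvValid d = false) :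
    pvStepA c d = none := by
  obtain ⟨x, y, z⟩ := c
  simp only [pvValid, Bool.or_eq_false_iff, beq_eq_false_iff_ne, ne_eq] at h
  simp [pvStepA, h.1.1.1.1.1, h.1.1.1.1.2, h.1.1.1.2, h.1.1.2, h.1.2, h.2]

-- a token is valid iff it is a key of B's delta table
lemma pvValid_iff_mem_deltas (d : String) :
    pvValid d = (pvDeltas.map Prod.fst).contains d := by
  simp only [pvValid, pvDeltas, List.map_cons, List.map_nil, List.contains_cons,
    List.contains_nil, Bool.or_false, Bool.or_assoc]

-- per line: A's step loop computes exactly B's closed-form coordinate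
lemma pvLineCoord_eq (line : List String)
    (h : ∀ d ∈ line.dropLast, pvValid d = true) :
    line.foldl (fun cur d => cur.bind (fun c => pvStepA c d))
        (some ((0 : Int), (0 : Int), (0 : Int))) = pvLineCoord line := by
  by_cases hall : ∀ d ∈ line, pvValid d = true
  · have hany : line.any (fun d => !(pvDeltas.map Prod.fst).contains d) = false := by
      rw [List.any_eq_false]
      intro d hd
      have hv := hall d hd
      rw [pvValid_iff_mem_deltas] at hv
      rw [hv]
      simp
    rw [pvFoldStep line hall 0 0 0]
    unfold pvLineCoord
    rw [hany]
    simp only [Bool.false_eq_true, if_false, pvDeltas, List.foldl_cons, List.foldl_nil,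
      PySem.Dict.getD_counter, Option.some.injEq]
    refine Prod.ext ?_ (Prod.ext ?_ ?_) <;> simp <;> ring
  · -- some token is invalid; by h it can only be the last one
    rcases List.eq_nil_or_concat line with hnil | ⟨front, a, hline⟩
    · subst hnil
      exact absurd (by simp) hall
    have hfront : ∀ d ∈ front, pvValid d = true := by
      intro d hd
      refine h d ?_
      rw [hline, List.concat_eq_append, List.dropLast_concat]
      exact hd
    have ha : pvValid a = false := by
      by_contra hc
      refine hall ?_
      intro d hd
      rw [hline, List.concat_eq_append, List.mem_append] at hd
      rcases hd with hd | hd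
      · exact hfront d hd
      · simp only [List.mem_singleton] at hd
        subst hd
        exact Bool.not_eq_false _ |>.mp hc
    have hany : line.any (fun d => !(pvDeltas.map Prod.fst).contains d) = true := by
      refine List.any_eq_true.mpr ⟨a, by simp [hline, List.concat_eq_append], ?_⟩
      rw [Bool.not_eq_true', ← pvValid_iff_mem_deltas]
      exact ha
    have hB : pvLineCoord line = none := by
      unfold pvLineCoord
      rw [hany]
      simp
    rw [hB, hline, List.concat_eq_append, List.foldl_append, pvFoldStep front hfront 0 0 0]
    simp only [List.foldl_cons, List.foldl_nil, Option.bind_some]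
    rw [pvStepA_invalid _ _ ha]

-- ===== VERDICT (by name: the statement is the Claim_ definition above) =====
theorem get_initial_black_tiles_spec : Claim_equal_get_initial_black_tiles := by
  intro lines _ hpre
  unfold Spec_get_initial_black_tiles get_initial_black_tiles get_initial_black_tiles_alt
  have hcoords :
      lines.foldl (fun acc line =>
        acc ++ [line.foldl (fun cur d => cur.bind (fun c => pvStepA c d))
                  (some ((0 : Int), (0 : Int), (0 : Int)))]) [] =
      lines.map pvLineCoord := by
    rw [PySem.List.foldl_append_singleton_eq_map]
    exact List.map_congr_left (fun line hline => pvLineCoord_eq line (hpre.1 line hline))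
  rw [hcoords]
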